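-- pv_equiv track=rewrite | github.com/jiroshimaya/kana-gibberish | src/kanagib/mora_statistics.py | mora_bigram_frequency
-- ===== SOURCE A (Python) =====
-- from collections import Counter, defaultdict
--
-- def mora_bigram_frequency(moras: list[str]) -> dict[str, dict[str, int]]:
--     """
--     Calculate the frequency of each mora bigram in a list of Japanese texts.
--     Uses a special token <SEP> for text boundaries and handles chunk boundaries.
--
--     Args:
--         texts (list[str]): List of Japanese texts
--
--     Returns:
--         dict[tuple[str, str], float]: Dictionary of mora bigrams
--             and their appearance rate
--     """
--     # Generate bigrams
--     bigrams = []
--     for i in range(len(moras) - 1):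
--         bigram = (moras[i], moras[i + 1])
--         bigrams.append(bigram)
--
--     bigram_freq = Counter(bigrams)
--
--     # Convert to probabilities
--     result_dict = {}
--     for (m1, m2), count in bigram_freq.items():
--         if m1 not in result_dict:
--             result_dict[m1] = {}
--         result_dict[m1][m2] = count
--     return result_dict
-- ===== SOURCE B (Python) =====
-- def mora_bigram_frequency(moras: list[str]) -> dict[str, dict[str, int]]:
--     pairs = list(zip(moras, moras[1:]))
--     result = {}
--     for m1, _ in pairs:
--         if m1 in result:
--             continue
--         inner = {}
--         for a, b in pairs:
--             if a == m1:
--                 inner[b] = inner.get(b, 0) + 1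
--         result[m1] = inner
--     return result
-- ===== Notes on version B (the rewrite author's own statement) =====
-- stated objective: alternative
-- what changed: Replaces A's Counter-then-regroup pipeline by a group-by scheme: for each distinct first mora in order of first appearance, a dedicated inner scan over the adjacent-pair list tallies its successors; no global bigram counter or mutable nested dict is maintained.
import Mathlib
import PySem

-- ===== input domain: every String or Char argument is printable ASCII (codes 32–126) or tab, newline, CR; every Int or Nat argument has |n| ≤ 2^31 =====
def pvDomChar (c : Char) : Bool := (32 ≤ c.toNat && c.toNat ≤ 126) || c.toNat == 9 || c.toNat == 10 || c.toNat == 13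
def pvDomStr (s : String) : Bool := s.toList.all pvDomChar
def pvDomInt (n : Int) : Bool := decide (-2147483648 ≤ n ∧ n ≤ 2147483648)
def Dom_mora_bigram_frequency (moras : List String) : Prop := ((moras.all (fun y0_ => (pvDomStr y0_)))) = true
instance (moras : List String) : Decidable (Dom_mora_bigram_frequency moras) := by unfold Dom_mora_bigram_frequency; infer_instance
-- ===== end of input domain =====

-- B replaces A's Counter-then-regroup pipeline by a group-by scheme: for each distinct first mora
-- in first-appearance order, a dedicated inner scan over the adjacent-pair list tallies its
-- successors; no global bigram counter or mutable nested dict is maintained (objective: alternative).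


-- ===== PORT A =====
-- step of A's regrouping loop: 'if m1 not in result_dict: result_dict[m1] = {}; result_dict[m1][m2] = count'
def mbfRegroupStep (r : PySem.Dict String (PySem.Dict String Int))
    (it : (String × String) × Int) : PySem.Dict String (PySem.Dict String Int) :=
  let r1 := if r.contains it.1.1 then r else r.insert it.1.1 PySem.Dict.empty
  r1.modify it.1.1 PySem.Dict.empty (fun inner => inner.insert it.1.2 it.2)

def mora_bigram_frequency (moras : List String) : List (String × List (String × Int)) :=
  -- bigrams = []; for i in range(len(moras) - 1): bigrams.append((moras[i], moras[i + 1]))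
  let bigrams := (PySem.List.pyRange 0 ((moras.length : Int) - 1) 1).foldl
    (fun bs i => bs ++ [(PySem.List.pyGetD moras i "", PySem.List.pyGetD moras (i + 1) "")]) []
  -- bigram_freq = Counter(bigrams)
  let bigram_freq := PySem.Dict.counter bigrams
  -- result_dict = {}; for (m1, m2), count in bigram_freq.items(): …
  let result_dict := bigram_freq.items.foldl mbfRegroupStep PySem.Dict.empty
  result_dict.items.map (fun kv => (kv.1, kv.2.items))

-- ===== PORT B =====
def mora_bigram_frequency_alt (moras : List String) : List (String × List (String × Int)) :=
  -- pairs = list(zip(moras, moras[1:]))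
  let pairs := moras.zip (PySem.List.slice moras (some 1) none)
  -- result = {}; for m1, _ in pairs: if m1 in result: continue;
  --   inner = {}; for a, b in pairs: if a == m1: inner[b] = inner.get(b, 0) + 1
  --   result[m1] = inner
  let result := pairs.foldl (fun r p =>
    if r.contains p.1 then r
    else r.insert p.1 (pairs.foldl (fun inn q =>
      if q.1 == p.1 then inn.modify q.2 0 (· + 1) else inn) PySem.Dict.empty)) PySem.Dict.empty
  result.items.map (fun kv => (kv.1, kv.2.items))

-- ===== PRECONDITION & SPEC =====
def Spec_mora_bigram_frequency (moras : List String) (out : List (String × List (String × Int))) : Prop := out = mora_bigram_frequency_alt moras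
instance (moras : List String) (out : List (String × List (String × Int))) : Decidable (Spec_mora_bigram_frequency moras out) := by unfold Spec_mora_bigram_frequency; infer_instance

-- ===== CLAIM (what is proved, stated in full; the proofs are below) =====
def Claim_equal_mora_bigram_frequency : Prop := ∀ (moras : List String), Dom_mora_bigram_frequency moras → Spec_mora_bigram_frequency moras (mora_bigram_frequency moras)

-- ===== LEMMAS AND PROOFS =====

-- the "fused" one-pass nested-count fold, used only as a proof-side bridge between A and B
def mbfFusedStep (r : PySem.Dict String (PySem.Dict String Int)) (p : String × String) :
    PySem.Dict String (PySem.Dict String Int) :=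
  r.modify p.1 PySem.Dict.empty (fun inner => inner.modify p.2 0 (· + 1))

-- B's inner scan with its guard, as a function of the target key
def mbfInnerOf (pairs : List (String × String)) (a : String) : PySem.Dict String Int :=
  pairs.foldl (fun inn q => if q.1 == a then inn.modify q.2 0 (· + 1) else inn) PySem.Dict.empty

lemma mbf_step_keys (d : PySem.Dict String (PySem.Dict String Int)) (it : (String × String) × ℤ) :
    (mbfRegroupStep d it).keys = PySem.Set.add d.keys it.1.1 := by
  unfold mbfRegroupStep
  by_cases h : d.contains it.1.1 = true
  · have hmem : it.1.1 ∈ d.keys := (PySem.Dict.contains_iff_mem_keys d it.1.1).mp h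
    simp [h, PySem.Dict.keys_modify, PySem.Dict.keys_insert_of_contains _ _ h,
      PySem.Set.add, PySem.Set.contains_eq_listContains, hmem]
  · have h' : d.contains it.1.1 = false := by simpa using h
    have hmem : it.1.1 ∉ d.keys := fun hm =>
      absurd ((PySem.Dict.contains_iff_mem_keys d it.1.1).mpr hm) h
    have hc : (d.insert it.1.1 (PySem.Dict.empty : PySem.Dict String Int)).contains it.1.1 = true := by
      simp
    simp [h', PySem.Dict.keys_modify, PySem.Dict.keys_insert_of_contains _ _ hc,
      PySem.Dict.keys_insert_of_not_contains _ _ h',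
      PySem.Set.add, PySem.Set.contains_eq_listContains, hmem]

lemma mbf_foldA_keys (items : List ((String × String) × ℤ))
    (d : PySem.Dict String (PySem.Dict String Int)) :
    (items.foldl mbfRegroupStep d).keys
      = PySem.Set.update d.keys (items.map (fun it => it.1.1)) := by
  induction items generalizing d with
  | nil => simp [PySem.Set.update]
  | cons it rest ih =>
      simp only [List.foldl_cons, List.map_cons, PySem.Set.update_cons, ih, mbf_step_keys]

lemma mbf_step_getD (d : PySem.Dict String (PySem.Dict String Int)) (it : (String × String) × ℤ)
    (a : String) :
    (mbfRegroupStep d it).getD a PySem.Dict.empty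
      = if it.1.1 = a then (d.getD a PySem.Dict.empty).insert it.1.2 it.2
        else d.getD a PySem.Dict.empty := by
  unfold mbfRegroupStep
  have hr1 : ∀ x, ((if d.contains it.1.1 then d else d.insert it.1.1 PySem.Dict.empty)).getD x PySem.Dict.empty = d.getD x PySem.Dict.empty := by
    intro x
    by_cases h : d.contains it.1.1 = true
    · simp [h]
    · have h' : d.contains it.1.1 = false := by simpa using h
      by_cases hx : x = it.1.1
      · subst hx
        simp [h', PySem.Dict.getD_insert_self, PySem.Dict.getD_of_not_contains _ _ h']
      · simp [h', PySem.Dict.getD_insert_of_ne _ _ _ hx]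
  simp only [PySem.Dict.getD_modify, hr1]
  by_cases hx : it.1.1 = a
  · simp [hx]
  · have hx' : ¬ a = it.1.1 := fun h => hx h.symm
    simp [hx, hx']

lemma mbf_foldA_getD (items : List ((String × String) × ℤ))
    (d : PySem.Dict String (PySem.Dict String Int)) (a : String) :
    (items.foldl mbfRegroupStep d).getD a PySem.Dict.empty
      = ((items.filter (fun it => it.1.1 == a)).foldl
          (fun inner it => inner.insert it.1.2 it.2) (d.getD a PySem.Dict.empty)) := by
  induction items generalizing d with
  | nil => simp
  | cons it rest ih =>
      simp only [List.foldl_cons, List.filter_cons, ih, mbf_step_getD]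
      by_cases hx : it.1.1 = a <;> simp [hx]

lemma mbf_foldB_getD (L : List (String × String))
    (d : PySem.Dict String (PySem.Dict String Int)) (a : String) :
    (L.foldl mbfFusedStep d).getD a PySem.Dict.empty
      = (((L.filter (fun p => p.1 == a)).map (fun p => p.2)).foldl
          (fun c b => c.modify b 0 (· + 1)) (d.getD a PySem.Dict.empty)) := by
  induction L generalizing d with
  | nil => simp
  | cons p rest ih =>
      simp only [List.foldl_cons, List.filter_cons, ih, mbfFusedStep, PySem.Dict.getD_modify]
      by_cases hx : p.1 = a
      · simp [hx]
      · have hx2 : ¬ a = p.1 := fun h => hx h.symm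
        simp [hx, hx2]

-- Set.add unfolded through membership
lemma mbf_add_of_mem {α : Type} [BEq α] [LawfulBEq α] (s : PySem.Set α) (x : α) (h : x ∈ s) :
    PySem.Set.add s x = s := by
  simp [PySem.Set.add, PySem.Set.contains_eq_listContains, h]

lemma mbf_add_of_not_mem {α : Type} [BEq α] [LawfulBEq α] (s : PySem.Set α) (x : α) (h : x ∉ s) :
    PySem.Set.add s x = s ++ [x] := by
  simp [PySem.Set.add, PySem.Set.contains_eq_listContains, h]

-- dedup commutes with a projection
lemma mbf_ofList_map {α β : Type} [BEq α] [LawfulBEq α] [BEq β] [LawfulBEq β]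
    (f : α → β) (L : List α) :
    PySem.Set.ofList (List.map f (PySem.Set.ofList L)) = PySem.Set.ofList (List.map f L) := by
  induction L using List.reverseRecOn with
  | nil => simp [PySem.Set.ofList_nil]
  | append_singleton L p ih =>
      rw [List.map_append, List.map_singleton, PySem.Set.ofList_append_singleton,
        PySem.Set.ofList_append_singleton, ← ih]
      by_cases h : p ∈ PySem.Set.ofList L
      · rw [mbf_add_of_mem _ _ h]
        exact (mbf_add_of_mem _ _ ((PySem.Set.mem_ofList _ _).mpr (List.mem_map_of_mem h))).symm
      · rw [mbf_add_of_not_mem _ _ h, List.map_append, List.map_singleton,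
          PySem.Set.ofList_append_singleton]

-- F1: first occurrences of (a, b) pairs, projected to b, = first occurrences of b among the seconds
lemma mbf_dedup_filter (L : List (String × String)) (a : String) :
    List.map (fun p => p.2) ((PySem.Set.ofList L).filter (fun k => k.1 == a))
      = PySem.Set.ofList (List.map (fun p => p.2) (L.filter (fun p => p.1 == a))) := by
  induction L using List.reverseRecOn with
  | nil => simp [PySem.Set.ofList_nil]
  | append_singleton L p ih =>
      rw [PySem.Set.ofList_append_singleton, List.filter_append]
      by_cases hm : p ∈ PySem.Set.ofList L
      · rw [mbf_add_of_mem _ _ hm]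
        have hpL : p ∈ L := (PySem.Set.mem_ofList _ _).mp hm
        by_cases ha : p.1 = a
        · have hb : p.2 ∈ List.map (fun p => p.2) (L.filter (fun p => p.1 == a)) := by
            exact List.mem_map_of_mem (List.mem_filter.mpr ⟨hpL, by simp [ha]⟩)
          simp only [List.filter_cons, List.filter_nil, ha, beq_self_eq_true, if_true,
            List.map_append, List.map_cons, List.map_nil, PySem.Set.ofList_append_singleton]
          rw [ih, mbf_add_of_mem _ _ ((PySem.Set.mem_ofList _ _).mpr hb)]
        · simp only [List.filter_cons, List.filter_nil, beq_iff_eq, ha, if_false, List.append_nil]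
          simpa using ih
      · rw [mbf_add_of_not_mem _ _ hm, List.filter_append]
        by_cases ha : p.1 = a
        · have hb : p.2 ∉ List.map (fun q => q.2) (L.filter (fun q => q.1 == a)) := by
            intro hmem
            rcases List.mem_map.mp hmem with ⟨q, hq, hq2⟩
            rcases List.mem_filter.mp hq with ⟨hqL, hqa⟩
            have : q = p := by
              have h1 : q.1 = a := by simpa using hqa
              have : q = (a, p.2) := by
                cases q; cases p; simp_all
              rw [this]
              cases p; simp_all
            exact (fun h => hm ((PySem.Set.mem_ofList _ _).mpr h)) (this ▸ hqL)
          simp only [List.filter_cons, List.filter_nil, ha, beq_self_eq_true, if_true,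
            List.map_append, List.map_cons, List.map_nil, PySem.Set.ofList_append_singleton]
          rw [ih, mbf_add_of_not_mem _ _ (by
            intro h; exact hb ((PySem.Set.mem_ofList _ _).mp h))]
        · simp only [List.filter_cons, List.filter_nil, beq_iff_eq, ha, if_false, List.append_nil]
          simpa using ih

-- F2: counting the pair (a, b) in L = counting b among seconds of pairs with first a
lemma mbf_count_pair (L : List (String × String)) (a b : String) :
    List.count (a, b) L
      = List.count b (List.map (fun p => p.2) (L.filter (fun p => p.1 == a))) := by
  induction L with
  | nil => simp
  | cons p rest ih =>
      by_cases ha : p.1 = a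
      · by_cases hb : p.2 = b
        · have : p = (a, b) := by cases p; simp_all
          simp [this, ih]
        · have : ¬ p = (a, b) := by cases p; simp_all
          simp [ha, hb, this, ih]
      · have : ¬ p = (a, b) := by cases p; simp_all
        simp [ha, this, ih]

-- the inner dictionaries of A's regrouped counter and the fused fold agree at every outer key
lemma mbf_inner_eq (L : List (String × String)) (a : String) :
    ((PySem.Dict.counter L).items.foldl mbfRegroupStep PySem.Dict.empty).getD a PySem.Dict.empty
      = (L.foldl mbfFusedStep PySem.Dict.empty).getD a PySem.Dict.empty := by
  rw [mbf_foldB_getD, PySem.Dict.getD_empty, ← PySem.Dict.counter_eq_foldl,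
    PySem.Dict.items_counter, mbf_foldA_getD, PySem.Dict.getD_empty, List.filter_map,
    List.foldl_map]
  have hcomp : ((fun it => it.1.1 == a) ∘ fun k => (k, (List.count k L : Int)))
      = fun k => k.1 == a := rfl
  rw [hcomp]
  apply PySem.Dict.ext
  rw [PySem.Dict.items_foldl_insert_fresh _ _ _ _ (fun _ _ => PySem.Dict.contains_empty _)
      (by rw [mbf_dedup_filter]; exact PySem.Set.nodup_ofList _),
    PySem.Dict.items_counter, ← mbf_dedup_filter, List.map_map]
  simp only [PySem.Dict.empty, List.nil_append]
  apply List.map_congr_left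
  intro k hk
  have ha : k.1 = a := by simpa using (List.mem_filter.mp hk).2
  have : k = (a, k.2) := by cases k; simp_all
  simp only [Function.comp]
  rw [this, ← mbf_count_pair]

-- A's regrouped counter IS the fused nested-count dict
lemma mbf_main (L : List (String × String)) :
    (PySem.Dict.counter L).items.foldl mbfRegroupStep PySem.Dict.empty
      = L.foldl mbfFusedStep PySem.Dict.empty := by
  have hkA : ((PySem.Dict.counter L).items.foldl mbfRegroupStep PySem.Dict.empty).keys
      = PySem.Set.ofList (L.map (fun p => p.1)) := by
    rw [mbf_foldA_keys, PySem.Dict.keys_empty, PySem.Set.update_nil_left,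
      PySem.Dict.items_counter, List.map_map]
    have : ((fun it => it.1.1) ∘ fun k => (k, (List.count k L : Int))) = fun k : String × String => k.1 := rfl
    rw [this, mbf_ofList_map]
  have hkB : (L.foldl mbfFusedStep (PySem.Dict.empty : PySem.Dict String (PySem.Dict String Int))).keys
        = PySem.Set.ofList (L.map (fun p => p.1)) := by
    rw [show mbfFusedStep = (fun r (p : String × String) =>
        r.modify p.1 PySem.Dict.empty (fun inner => inner.modify p.2 0 (· + 1))) from rfl,
      PySem.Dict.keys_foldl_modify_key L (fun p => p.1) PySem.Dict.empty
        (fun _ p => fun inner => inner.modify p.2 0 (· + 1)), PySem.Dict.keys_empty,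
      PySem.Set.update_nil_left]
  apply PySem.Dict.ext
  rw [PySem.Dict.items_eq_map_keys _ (by rw [hkA]; exact PySem.Set.nodup_ofList _) PySem.Dict.empty,
    PySem.Dict.items_eq_map_keys _ (by rw [hkB]; exact PySem.Set.nodup_ofList _) PySem.Dict.empty,
    hkA, hkB]
  exact List.map_congr_left (fun a _ => by rw [mbf_inner_eq])

-- B's inner guarded scan = the filtered-map counting fold of the fused characterisation
lemma mbf_inner_filter (pairs : List (String × String)) (a : String) :
    mbfInnerOf pairs a
      = ((pairs.filter (fun p => p.1 == a)).map (fun p => p.2)).foldl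
          (fun c b => c.modify b 0 (· + 1)) PySem.Dict.empty := by
  unfold mbfInnerOf
  rw [List.foldl_map]
  generalize (PySem.Dict.empty : PySem.Dict String Int) = d
  induction pairs generalizing d with
  | nil => simp
  | cons p rest ih =>
      simp only [List.foldl_cons, List.filter_cons]
      by_cases h : (p.1 == a) = true
      · rw [if_pos h, if_pos h, List.foldl_cons]
        exact ih _
      · rw [if_neg h, if_neg h]
        exact ih _

-- keys of B's group-by fold
lemma mbf_foldC_keys (pairs L : List (String × String))
    (d : PySem.Dict String (PySem.Dict String Int)) :
    (L.foldl (fun r p => if r.contains p.1 then r else r.insert p.1 (mbfInnerOf pairs p.1)) d).keys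
      = PySem.Set.update d.keys (L.map (fun p => p.1)) := by
  induction L generalizing d with
  | nil => simp [PySem.Set.update]
  | cons p rest ih =>
      simp only [List.foldl_cons, List.map_cons, PySem.Set.update_cons, ih]
      congr 1
      by_cases h : d.contains p.1 = true
      · have hmem : p.1 ∈ d.keys := (PySem.Dict.contains_iff_mem_keys d p.1).mp h
        simp [h, mbf_add_of_mem _ _ hmem]
      · have h' : d.contains p.1 = false := by simpa using h
        have hmem : p.1 ∉ d.keys := fun hm =>
          absurd ((PySem.Dict.contains_iff_mem_keys d p.1).mpr hm) h
        simp [h', PySem.Dict.keys_insert_of_not_contains _ _ h', mbf_add_of_not_mem _ _ hmem]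

-- values of B's group-by fold
lemma mbf_foldC_getD (pairs L : List (String × String))
    (d : PySem.Dict String (PySem.Dict String Int)) (a : String) :
    (L.foldl (fun r p => if r.contains p.1 then r else r.insert p.1 (mbfInnerOf pairs p.1)) d).getD a PySem.Dict.empty
      = if d.contains a then d.getD a PySem.Dict.empty
        else if a ∈ L.map (fun p => p.1) then mbfInnerOf pairs a else PySem.Dict.empty := by
  induction L generalizing d with
  | nil =>
      by_cases h : d.contains a = true
      · simp [h]
      · have h' : d.contains a = false := by simpa using h
        simp [h', PySem.Dict.getD_of_not_contains _ _ h']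
  | cons p rest ih =>
      simp only [List.foldl_cons]
      by_cases hp : d.contains p.1 = true
      · rw [if_pos hp, ih]
        by_cases ha : d.contains a = true
        · simp [ha]
        · have ha' : d.contains a = false := by simpa using ha
          have hne : ¬ a = p.1 := fun h => by rw [h] at ha'; rw [ha'] at hp; exact absurd hp (by simp)
          have hmc : (a ∈ p.1 :: List.map (fun p => p.1) rest) = (a ∈ List.map (fun p => p.1) rest) := by
            simp [List.mem_cons, hne]
          simp only [ha', Bool.false_eq_true, if_false, List.map_cons, hmc]
      · have hp' : d.contains p.1 = false := by simpa using hp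
        rw [if_neg (by simp [hp']), ih]
        by_cases hap : a = p.1
        · have hc : (d.insert p.1 (mbfInnerOf pairs p.1)).contains a = true := by
            rw [hap]; simp
          have hda : d.contains a = false := by rw [hap]; exact hp'
          rw [if_pos hc, if_neg (by simp [hda]), hap, PySem.Dict.getD_insert_self, List.map_cons,
            if_pos (List.mem_cons_self)]
        · have hc : (d.insert p.1 (mbfInnerOf pairs p.1)).contains a = d.contains a := by
            rw [PySem.Dict.contains_insert]
            have hbe : (a == p.1) = false := by simpa using hap
            rw [hbe, Bool.false_or]
          rw [hc]
          by_cases ha : d.contains a = true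
          · rw [if_pos ha, if_pos ha, PySem.Dict.getD_insert_of_ne _ _ _ hap]
          · have ha' : d.contains a = false := by simpa using ha
            have hmc : (a ∈ p.1 :: List.map (fun p => p.1) rest) = (a ∈ List.map (fun p => p.1) rest) := by
              simp [List.mem_cons, hap]
            simp only [ha', Bool.false_eq_true, if_false, List.map_cons, hmc]

-- the fused dict equals B's group-by dict
lemma mbf_fused_eq_groupby (pairs : List (String × String)) :
    pairs.foldl mbfFusedStep PySem.Dict.empty
      = pairs.foldl (fun r p => if r.contains p.1 then r else r.insert p.1 (mbfInnerOf pairs p.1))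
          PySem.Dict.empty := by
  have hkA : (pairs.foldl mbfFusedStep (PySem.Dict.empty : PySem.Dict String (PySem.Dict String Int))).keys
      = PySem.Set.ofList (pairs.map (fun p => p.1)) := by
    rw [show mbfFusedStep = (fun r (p : String × String) =>
        r.modify p.1 PySem.Dict.empty (fun inner => inner.modify p.2 0 (· + 1))) from rfl,
      PySem.Dict.keys_foldl_modify_key pairs (fun p => p.1) PySem.Dict.empty
        (fun _ p => fun inner => inner.modify p.2 0 (· + 1)), PySem.Dict.keys_empty,
      PySem.Set.update_nil_left]
  have hkB : (pairs.foldl (fun r p => if r.contains p.1 then r else r.insert p.1 (mbfInnerOf pairs p.1))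
        (PySem.Dict.empty : PySem.Dict String (PySem.Dict String Int))).keys
      = PySem.Set.ofList (pairs.map (fun p => p.1)) := by
    rw [mbf_foldC_keys, PySem.Dict.keys_empty, PySem.Set.update_nil_left]
  apply PySem.Dict.ext
  rw [PySem.Dict.items_eq_map_keys _ (by rw [hkA]; exact PySem.Set.nodup_ofList _) PySem.Dict.empty,
    PySem.Dict.items_eq_map_keys _ (by rw [hkB]; exact PySem.Set.nodup_ofList _) PySem.Dict.empty,
    hkA, hkB]
  apply List.map_congr_left
  intro a hmem
  have hamem : a ∈ pairs.map (fun p => p.1) := (PySem.Set.mem_ofList _ _).mp hmem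
  rw [mbf_foldB_getD, PySem.Dict.getD_empty, mbf_foldC_getD, PySem.Dict.contains_empty,
    if_neg (by simp), if_pos hamem, mbf_inner_filter]

-- A's index loop builds exactly zip(moras, moras[1:])
lemma mbf_bigrams (moras : List String) :
    (PySem.List.pyRange 0 ((moras.length : Int) - 1) 1).foldl
      (fun bs i => bs ++ [(PySem.List.pyGetD moras i "", PySem.List.pyGetD moras (i + 1) "")]) []
      = moras.zip moras.tail := by
  rw [PySem.List.foldl_append_singleton_eq_map, List.nil_append, PySem.List.pyRange_one,
    List.map_map]
  apply List.ext_getElem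
  · simp [List.length_zip, List.length_tail]
  · intro k h1 h2
    simp only [List.getElem_map, List.getElem_range, Function.comp, List.getElem_zip]
    have hlen : k + 1 < moras.length := by
      simp at h1; omega
    have e1 : PySem.List.pyGetD moras ((0 : Int) + (k : Int)) "" = moras[k] := by
      rw [PySem.List.pyGetD_eq_getElem moras "" (by omega) (by omega)]
      congr 1; omega
    have e2 : PySem.List.pyGetD moras ((0 : Int) + (k : Int) + 1) "" = moras[k + 1] := by
      rw [PySem.List.pyGetD_eq_getElem moras "" (by omega) (by omega)]
      congr 1; omega
    rw [e1, e2]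
    congr 1
    rw [List.getElem_tail]

-- ===== VERDICT (by name: the statement is the Claim_ definition above) =====
theorem mora_bigram_frequency_spec : Claim_equal_mora_bigram_frequency := by
  intro moras _
  show mora_bigram_frequency moras = mora_bigram_frequency_alt moras
  simp only [mora_bigram_frequency, mora_bigram_frequency_alt, PySem.List.slice_from_one]
  rw [mbf_bigrams, mbf_main, mbf_fused_eq_groupby]
  rfl
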